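-- pv_equiv track=rewrite | github.com/Ragul171/Programming-data-structures-using-python-week-3-solutions | programs.py | contracting
-- ===== SOURCE A (Python) =====
-- def contracting(l):
--     s=0
--     for i in range(0,len(l)-2):
--         if(abs(l[i]-l[i+1])>abs(l[i+1]-l[i+2])):
--             s+=1
--         else:
--             s=0
--         if s == 0:
--             break
--     if s != 0:
--       return True
--     else:
--       return False
-- ===== SOURCE B (Python) =====
-- def contracting(l):
--     diffs = [abs(x - y) for x, y in zip(l, l[1:])]
--     if len(diffs) < 2:
--         return False
--     return diffs == sorted(diffs, reverse=True) and len(set(diffs)) == len(diffs)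
-- ===== Notes on version B (the rewrite author's own statement) =====
-- stated objective: alternative
-- what changed: Replaces A's interleaved counter-and-break index scan with a sort-based characterization: build the absolute-gap list, then test that it equals its own descending sort and contains no duplicate values (strictly decreasing iff sorted descending and all distinct).
import Mathlib
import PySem

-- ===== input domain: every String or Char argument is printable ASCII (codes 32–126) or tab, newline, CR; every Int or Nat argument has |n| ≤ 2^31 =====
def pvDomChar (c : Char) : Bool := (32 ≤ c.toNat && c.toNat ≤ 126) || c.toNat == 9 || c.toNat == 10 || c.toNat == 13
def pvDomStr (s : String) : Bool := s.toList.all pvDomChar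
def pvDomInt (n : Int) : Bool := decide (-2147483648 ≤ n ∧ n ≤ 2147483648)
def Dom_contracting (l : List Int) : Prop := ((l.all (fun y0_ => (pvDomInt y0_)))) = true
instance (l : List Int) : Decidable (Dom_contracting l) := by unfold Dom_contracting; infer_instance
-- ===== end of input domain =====

-- B replaces A's interleaved counter-and-break scan by a sort-based characterization:
-- the gap list is strictly decreasing iff it equals its own descending sort and has no
-- duplicate values; same result, different algorithm (O(n log n) in Python, no faster claim).

-- ===== PORT A =====
-- the for-loop over range(0, len(l)-2) with the counter s and the break
def contractingLoop (l : List Int) : List Int → Int → Int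
  | [], s => s
  | i :: rest, s =>
      let s1 : Int :=
        if |PySem.List.pyGetD l i 0 - PySem.List.pyGetD l (i+1) 0| >
           |PySem.List.pyGetD l (i+1) 0 - PySem.List.pyGetD l (i+2) 0| then s + 1 else 0
      if s1 = 0 then s1 else contractingLoop l rest s1

def contracting (l : List Int) : Bool :=
  let s := contractingLoop l (PySem.List.pyRange 0 (PySem.List.len l - 2) 1) 0
  if s ≠ 0 then true else false

-- ===== PORT B =====
def contracting_alt (l : List Int) : Bool :=
  let diffs := (l.zip (PySem.List.slice l (some 1) none)).map (fun p => |p.1 - p.2|)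
  if PySem.List.len diffs < 2 then false
  else decide (diffs = PySem.List.sorted diffs (fun x => x) true) &&
       decide (PySem.Set.len (PySem.Set.ofList diffs) = PySem.List.len diffs)

-- ===== PRECONDITION & SPEC =====
def Spec_contracting (l : List Int) (out : Bool) : Prop := out = contracting_alt l
instance (l : List Int) (out : Bool) : Decidable (Spec_contracting l out) := by unfold Spec_contracting; infer_instance

-- ===== CLAIM =====
def Claim_equal_contracting : Prop := ∀ (l : List Int), Dom_contracting l → Spec_contracting l (contracting l)

-- ===== LEMMAS AND PROOFS =====

-- abbreviation used only in proofs: the i-th absolute gap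
def pvGap (l : List Int) (i : Int) : Int :=
  |PySem.List.pyGetD l i 0 - PySem.List.pyGetD l (i+1) 0|

def pvDiffs (l : List Int) : List Int :=
  (l.zip l.tail).map (fun p => |p.1 - p.2|)

lemma contractingLoop_ne_zero (l : List Int) (idxs : List Int) (s : Int) (hs : 0 ≤ s) :
    (contractingLoop l idxs s ≠ 0) ↔
      ((idxs.all (fun i => decide (pvGap l i > pvGap l (i+1))) = true) ∧ (idxs ≠ [] ∨ s ≠ 0)) := by
  induction idxs generalizing s with
  | nil => simp [contractingLoop]
  | cons i rest ih =>
      have h2 : i + 1 + 1 = i + 2 := by ring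
      simp only [contractingLoop]
      by_cases hc : pvGap l i > pvGap l (i+1)
      · have hc0 : |PySem.List.pyGetD l i 0 - PySem.List.pyGetD l (i+1) 0| >
            |PySem.List.pyGetD l (i+1) 0 - PySem.List.pyGetD l (i+2) 0| := by
          unfold pvGap at hc; rwa [h2] at hc
        have hsz : ¬ (s + 1 = 0) := by omega
        rw [if_pos hc0, if_neg hsz, ih (s+1) (by omega)]
        simp only [List.all_cons, Bool.and_eq_true]
        constructor
        · rintro ⟨ha, -⟩
          exact ⟨⟨decide_eq_true hc, ha⟩, Or.inl (by simp)⟩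
        · rintro ⟨⟨-, ha⟩, -⟩
          exact ⟨ha, Or.inr hsz⟩
      · have hc0 : ¬ (|PySem.List.pyGetD l i 0 - PySem.List.pyGetD l (i+1) 0| >
            |PySem.List.pyGetD l (i+1) 0 - PySem.List.pyGetD l (i+2) 0|) := by
          unfold pvGap at hc; rwa [h2] at hc
        rw [if_neg hc0, if_pos rfl]
        simp [List.all_cons, hc]

-- common reference form: length ≥ 3 and every adjacent pair of gaps strictly decreases
def pvChk (l : List Int) : Bool :=
  decide (3 ≤ l.length) &&
  (PySem.List.pyRange 0 ((l.length : Int) - 2) 1).all (fun i => decide (pvGap l i > pvGap l (i+1)))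

lemma contracting_eq_chk (l : List Int) : contracting l = pvChk l := by
  unfold contracting pvChk
  simp only [PySem.List.len_eq]
  by_cases h3 : 3 ≤ l.length
  · have hne : PySem.List.pyRange 0 ((l.length : Int) - 2) 1 ≠ [] := by
      have h0 : (0 : Int) ∈ PySem.List.pyRange 0 ((l.length : Int) - 2) 1 := by
        rw [PySem.List.mem_pyRange_one]; omega
      intro h; rw [h] at h0; simp at h0
    have hloop := contractingLoop_ne_zero l (PySem.List.pyRange 0 ((l.length : Int) - 2) 1) 0 le_rfl
    by_cases hb : ((PySem.List.pyRange 0 ((l.length : Int) - 2) 1).all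
        (fun i => decide (pvGap l i > pvGap l (i+1)))) = true
    · have h0 := hloop.2 ⟨hb, Or.inl hne⟩
      simp [h0, h3, hb]
    · have h0 : ¬ contractingLoop l (PySem.List.pyRange 0 ((l.length : Int) - 2) 1) 0 ≠ 0 :=
        fun h => hb (hloop.1 h).1
      simp only [ne_eq, not_not] at h0
      simp [h0, h3, Bool.eq_false_iff.mpr hb]
  · have hre : PySem.List.pyRange 0 ((l.length : Int) - 2) 1 = [] :=
      PySem.List.pyRange_one_eq_nil (by omega)
    simp [hre, contractingLoop, h3]

lemma pvDiffs_length (l : List Int) : (pvDiffs l).length = l.length - 1 := by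
  simp only [pvDiffs, List.length_map, List.length_zip, List.length_tail]
  omega

lemma pvDiffs_getElem (l : List Int) (i : Nat) (h : i + 1 < l.length) :
    (pvDiffs l)[i]'(by rw [pvDiffs_length]; omega) =
      |l[i]'(by omega) - l[i+1]'(by omega)| := by
  simp [pvDiffs, List.getElem_tail]

lemma pvGap_eq_diffs (l : List Int) (k : Nat) (h1 : k + 1 < l.length) :
    pvGap l (k : Int) = (pvDiffs l)[k]'(by rw [pvDiffs_length]; omega) := by
  rw [pvDiffs_getElem l k h1]
  unfold pvGap
  have e1 : ((k : Int) + 1) = ((k + 1 : Nat) : Int) := by push_cast; ring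
  rw [e1, PySem.List.pyGetD_natCast, PySem.List.pyGetD_natCast,
      List.getD_eq_getElem l 0 (by omega), List.getD_eq_getElem l 0 (by omega)]

-- d is strictly decreasing iff every adjacent pair decreases
lemma pairwise_iff_adj (d : List Int) :
    d.Pairwise (· > ·) ↔ ∀ (i : Nat) (h : i + 1 < d.length), d[i] > d[i+1] := by
  rw [← List.isChain_iff_pairwise, List.isChain_iff_getElem]

-- foldl Set.add s appends a subsequence of the consumed list to s
lemma foldl_add_sublist {α : Type} [DecidableEq α] (xs : List α) :
    ∀ s : List α, ∃ t, xs.foldl PySem.Set.add s = s ++ t ∧ t.Sublist xs := by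
  induction xs with
  | nil => intro s; exact ⟨[], by simp, List.Sublist.refl _⟩
  | cons x rest ih =>
      intro s
      by_cases hx : x ∈ s
      · obtain ⟨t, ht, hs⟩ := ih s
        refine ⟨t, ?_, hs.cons x⟩
        simpa [List.foldl_cons, PySem.Set.add, PySem.Set.contains, hx] using ht
      · obtain ⟨t, ht, hs⟩ := ih (s ++ [x])
        refine ⟨x :: t, ?_, hs.cons₂ x⟩
        simp only [List.foldl_cons, PySem.Set.add, PySem.Set.contains]
        simp only [List.contains_eq_mem, hx, decide_false,
          Bool.false_eq_true, if_false]
        rw [ht]; simp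

lemma nodup_of_ofList_length {α : Type} [DecidableEq α] (xs : List α)
    (h : (PySem.Set.ofList xs).length = xs.length) : xs.Nodup := by
  obtain ⟨t, ht, hs⟩ := foldl_add_sublist xs []
  have he : PySem.Set.ofList xs = t := by
    rw [PySem.Set.ofList_eq_foldl, ht]; simp
  have : t = xs := hs.eq_of_length (by rw [← he, h])
  rw [← this, ← he]
  exact PySem.Set.nodup_ofList xs

lemma sorted_nodup_iff_pairwise (d : List Int) :
    (d = PySem.List.sorted d (fun x => x) true ∧ (PySem.Set.ofList d).length = d.length)
      ↔ d.Pairwise (· > ·) := by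
  constructor
  · rintro ⟨hsort, hlen⟩
    have hge : d.Pairwise (fun a b => b ≤ a) := by
      have := PySem.List.sorted_pairwise_rev d (fun x => x)
      rwa [← hsort] at this
    have hne : d.Pairwise (· ≠ ·) := nodup_of_ofList_length d hlen
    exact (hge.and hne).imp (fun h => lt_of_le_of_ne h.1 (Ne.symm h.2))
  · intro hp
    refine ⟨(PySem.List.sorted_rev_eq_of_perm_of_pairwise_gt d d (fun x => x)
        (List.Perm.refl d) hp).symm, ?_⟩
    have hnd : d.Nodup := hp.imp (fun h => ne_of_gt h)
    rw [PySem.Set.ofList_eq_self_of_nodup d hnd]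

-- the pyRange adjacency scan says exactly that the gap list is strictly decreasing
lemma all_iff_pairwise (l : List Int) :
    ((PySem.List.pyRange 0 ((l.length : Int) - 2) 1).all
        (fun i => decide (pvGap l i > pvGap l (i+1))) = true)
      ↔ (pvDiffs l).Pairwise (· > ·) := by
  have hL := pvDiffs_length l
  rw [List.all_eq_true, pairwise_iff_adj]
  constructor
  · intro hall i hi
    have hmem : ((i : Nat) : Int) ∈ PySem.List.pyRange 0 ((l.length : Int) - 2) 1 := by
      rw [PySem.List.mem_pyRange_one]; omega
    have h := hall _ hmem
    rw [decide_eq_true_eq] at h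
    have e1 : ((i : Int) + 1) = ((i + 1 : Nat) : Int) := by push_cast; ring
    rwa [pvGap_eq_diffs l i (by omega), e1, pvGap_eq_diffs l (i+1) (by omega)] at h
  · intro hadj i hi
    rw [PySem.List.mem_pyRange_one] at hi
    rw [decide_eq_true_eq]
    obtain ⟨k, rfl⟩ : ∃ k : Nat, i = (k : Int) := ⟨i.toNat, by omega⟩
    have e1 : ((k : Int) + 1) = ((k + 1 : Nat) : Int) := by push_cast; ring
    rw [pvGap_eq_diffs l k (by omega), e1, pvGap_eq_diffs l (k+1) (by omega)]
    exact hadj k (by omega)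

lemma contracting_alt_eq_chk (l : List Int) : contracting_alt l = pvChk l := by
  have hd : (l.zip (PySem.List.slice l (some 1) none)).map (fun p => |p.1 - p.2|) = pvDiffs l := by
    rw [PySem.List.slice_from_one]; rfl
  have hL := pvDiffs_length l
  unfold contracting_alt pvChk
  rw [hd]
  simp only [PySem.List.len_eq, PySem.Set.len]
  by_cases h3 : 3 ≤ l.length
  · rw [if_neg (by omega)]
    rw [decide_eq_true h3, Bool.true_and]
    by_cases hp : (pvDiffs l).Pairwise (· > ·)
    · have hb := (sorted_nodup_iff_pairwise (pvDiffs l)).2 hp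
      rw [(all_iff_pairwise l).2 hp, decide_eq_true hb.1]
      simp only [Bool.true_and]
      exact decide_eq_true (by exact_mod_cast hb.2)
    · rw [Bool.eq_false_iff.mpr (fun h => hp ((all_iff_pairwise l).1 h))]
      rcases Decidable.em (pvDiffs l = PySem.List.sorted (pvDiffs l) (fun x => x) true) with hs | hs
      · rcases Decidable.em (((PySem.Set.ofList (pvDiffs l)).length : Int)
            = ((pvDiffs l).length : Int)) with hn | hn
        · exact absurd ((sorted_nodup_iff_pairwise (pvDiffs l)).1 ⟨hs, by omega⟩) hp
        · rw [decide_eq_true hs, Bool.true_and]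
          exact decide_eq_false hn
      · rw [decide_eq_false hs, Bool.false_and]
  · rw [if_pos (by omega)]
    simp [decide_eq_false h3]

-- ===== VERDICT =====
theorem contracting_spec : Claim_equal_contracting := by
  intro l _
  unfold Spec_contracting
  rw [contracting_eq_chk, contracting_alt_eq_chk]
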